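-- pv_equiv track=rewrite | github.com/ooyejinn/algorithm | 프로그래머스/2/17677. ［1차］ 뉴스 클러스터링/［1차］ 뉴스 클러스터링.py | make_multiset
-- ===== SOURCE A (Python) =====
-- def make_multiset(s):
--     s = s.lower()
--     multiset = []
--
--     for i in range(len(s) - 1):
--         a, b = s[i], s[i+1]
--         if a.isalpha() and b.isalpha():
--             multiset.append(a + b)
--     return multiset
-- ===== SOURCE B (Python) =====
-- def make_multiset(s):
--     # Segment the lowercased string into maximal alphabetic runs, then emit
--     # every consecutive pair inside each run (no per-index neighbour re-tests).
--     s = s.lower()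
--     result = []
--     run = []
--     for c in s:
--         if c.isalpha():
--             run.append(c)
--         else:
--             result.extend(x + y for x, y in zip(run, run[1:]))
--             run = []
--     result.extend(x + y for x, y in zip(run, run[1:]))
--     return result
-- ===== Notes on version B (the rewrite author's own statement) =====
-- stated objective: alternative
-- what changed: Replaces the flat index loop that tests both neighbours at every position with a single pass that accumulates maximal alphabetic runs and emits the consecutive pairs of each run via zip.
import Mathlib
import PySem

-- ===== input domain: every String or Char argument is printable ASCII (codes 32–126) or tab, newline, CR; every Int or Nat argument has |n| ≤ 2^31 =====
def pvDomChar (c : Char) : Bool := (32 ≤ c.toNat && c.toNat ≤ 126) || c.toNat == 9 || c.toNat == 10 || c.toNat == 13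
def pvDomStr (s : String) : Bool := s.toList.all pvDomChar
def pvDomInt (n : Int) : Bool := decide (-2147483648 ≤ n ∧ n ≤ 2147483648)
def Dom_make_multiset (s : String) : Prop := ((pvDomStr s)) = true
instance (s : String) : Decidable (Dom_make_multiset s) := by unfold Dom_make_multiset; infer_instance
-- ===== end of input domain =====

-- B replaces A's flat index loop (which re-tests both neighbours at each i) by one pass that
-- accumulates maximal alphabetic runs and emits each run's consecutive pairs: alternative decomposition, same cost.

-- ===== PORT A =====
-- literal transliteration of A: lowercase, then for i in range(len(s)-1) append s[i]+s[i+1] when both are alphabetic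
def make_multiset (s : String) : List String :=
  let t := PySem.Str.lower s
  (PySem.List.pyRange 0 (PySem.Str.len t - 1) 1).foldl
    (fun multiset i =>
      let a := PySem.List.pyGetD t.toList i ' '
      let b := PySem.List.pyGetD t.toList (i + 1) ' '
      if PySem.Chars.isalpha a && PySem.Chars.isalpha b then multiset ++ [String.mk [a, b]]
      else multiset) []

-- ===== PORT B =====
-- pairs of consecutive characters of a run: 'x + y for x, y in zip(run, run[1:])'
def pvPairs (run : List Char) : List String :=
  (run.zip run.tail).map (fun p => String.mk [p.1, p.2])

-- transliteration of Source B: fold over the lowered characters keeping (result, current run), final flush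
def make_multiset_alt (s : String) : List String :=
  let t := PySem.Str.lower s
  let st := t.toList.foldl
    (fun (st : List String × List Char) c =>
      if PySem.Chars.isalpha c then (st.1, st.2 ++ [c])
      else (st.1 ++ pvPairs st.2, []))
    ([], [])
  st.1 ++ pvPairs st.2

-- ===== PRECONDITION & SPEC =====
def Spec_make_multiset (s : String) (out : List String) : Prop := out = make_multiset_alt s
instance (s : String) (out : List String) : Decidable (Spec_make_multiset s out) := by unfold Spec_make_multiset; infer_instance

-- ===== CLAIM (what is proved, stated in full; the proofs are below) =====
def Claim_equal_make_multiset : Prop := ∀ (s : String), Dom_make_multiset s → Spec_make_multiset s (make_multiset s)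

-- ===== LEMMAS AND PROOFS =====

-- canonical recursive characterisation of the adjacent-alphabetic-pairs list
def pvPF : List Char → List String
  | [] => []
  | [_] => []
  | a :: b :: rest =>
    (if PySem.Chars.isalpha a && PySem.Chars.isalpha b then [String.mk [a, b]] else []) ++ pvPF (b :: rest)

-- A's index loop, in Nat-range form, computes pvPF
theorem pvA_loop (cs : List Char) (acc : List String) :
    (List.range (cs.length - 1)).foldl
      (fun multiset k =>
        if PySem.Chars.isalpha (cs.getD k ' ') && PySem.Chars.isalpha (cs.getD (k + 1) ' ')
        then multiset ++ [String.mk [cs.getD k ' ', cs.getD (k + 1) ' ']] else multiset) acc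
    = acc ++ pvPF cs := by
  induction cs generalizing acc with
  | nil => simp [pvPF]
  | cons a cs ih =>
    cases cs with
    | nil => simp [pvPF]
    | cons b r =>
      have hlen : (a :: b :: r).length - 1 = r.length + 1 := by simp
      have hlen2 : (b :: r).length - 1 = r.length := by simp
      rw [hlen, List.range_succ_eq_map, List.foldl_cons, List.foldl_map]
      simp only [Nat.succ_eq_add_one, List.getD_cons_zero, List.getD_cons_succ]
      have ih' := ih (acc := if (PySem.Chars.isalpha a && PySem.Chars.isalpha b) = true
        then acc ++ [String.mk [a, b]] else acc)
      simp only [hlen2, List.getD_cons_succ] at ih'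
      rw [ih']
      rw [show pvPF (a :: b :: r)
          = (if PySem.Chars.isalpha a && PySem.Chars.isalpha b then [String.mk [a, b]] else [])
            ++ pvPF (b :: r) from rfl]
      split_ifs <;> simp

-- B's fold with the final flush computes pvF
def pvF : List Char → List Char → List String
  | run, [] => pvPairs run
  | run, c :: cs =>
    if PySem.Chars.isalpha c then pvF (run ++ [c]) cs else pvPairs run ++ pvF [] cs

theorem pvB_loop (cs : List Char) (res : List String) (run : List Char) :
    (cs.foldl
      (fun (st : List String × List Char) c =>
        if PySem.Chars.isalpha c then (st.1, st.2 ++ [c])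
        else (st.1 ++ pvPairs st.2, [])) (res, run)).1
      ++ pvPairs (cs.foldl
      (fun (st : List String × List Char) c =>
        if PySem.Chars.isalpha c then (st.1, st.2 ++ [c])
        else (st.1 ++ pvPairs st.2, [])) (res, run)).2
    = res ++ pvF run cs := by
  induction cs generalizing res run with
  | nil => simp [pvF]
  | cons c cs ih =>
    by_cases h : PySem.Chars.isalpha c = true
    · simp only [List.foldl_cons, h, if_pos, pvF, ih]
    · simp only [List.foldl_cons, pvF, h, if_neg, Bool.false_eq_true, not_false_iff, ih,
        List.append_assoc]

-- an all-alphabetic list's pvPF is exactly its consecutive pairs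
theorem pvPF_all (run : List Char) (h : run.all PySem.Chars.isalpha = true) :
    pvPF run = pvPairs run := by
  induction run with
  | nil => simp [pvPF, pvPairs]
  | cons a t ih =>
    cases t with
    | nil => simp [pvPF, pvPairs]
    | cons b r =>
      simp only [List.all_cons, Bool.and_eq_true] at h
      simp [pvPF, h.1, h.2.1, pvPairs, ih (by simp [h.2.1, h.2.2])]

-- a non-alphabetic head contributes nothing
theorem pvPF_drop (c : Char) (cs : List Char) (h : PySem.Chars.isalpha c = false) :
    pvPF (c :: cs) = pvPF cs := by
  cases cs with
  | nil => simp [pvPF]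
  | cons d r => simp [pvPF, h]

-- pvPF splits at a non-alphabetic character after an all-alphabetic run
theorem pvPF_split (run : List Char) (c : Char) (cs : List Char)
    (hrun : run.all PySem.Chars.isalpha = true) (hc : PySem.Chars.isalpha c = false) :
    pvPF (run ++ c :: cs) = pvPairs run ++ pvPF (c :: cs) := by
  induction run with
  | nil => simp [pvPairs]
  | cons a t ih =>
    cases t with
    | nil =>
      simp only [List.all_cons, Bool.and_eq_true] at hrun
      simp [pvPF, hc, pvPairs]
    | cons b r =>
      simp only [List.all_cons, Bool.and_eq_true] at hrun
      have := ih (by simp [hrun.2.1, hrun.2.2])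
      simp only [List.cons_append, pvPF, hrun.1, hrun.2.1, Bool.and_self, if_pos] at this ⊢
      simp [this, pvPairs]

-- pvF run cs = pvPF (run ++ cs) for an all-alphabetic pending run
theorem pvF_eq_pvPF (cs run : List Char) (h : run.all PySem.Chars.isalpha = true) :
    pvF run cs = pvPF (run ++ cs) := by
  induction cs generalizing run with
  | nil => simpa [pvF] using (pvPF_all run h).symm
  | cons c cs ih =>
    by_cases hc : PySem.Chars.isalpha c = true
    · have : run ++ c :: cs = (run ++ [c]) ++ cs := by simp
      rw [this, ← ih (run ++ [c]) (by simp [List.all_append, h, hc])]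
      simp [pvF, hc]
    · have hc' : PySem.Chars.isalpha c = false := by simpa using hc
      have h0 : pvF [] cs = pvPF cs := by simpa using ih [] (by simp)
      rw [pvPF_split run c cs h hc', pvPF_drop c cs hc', ← h0]
      simp [pvF, hc']

-- ===== VERDICT (by name: the statement is the Claim_ definition above) =====
-- A's loop over the lowered character list, inlined, equals pvPF
theorem pvA_eq (cs : List Char) :
    (PySem.List.pyRange 0 ((cs.length : Int) - 1) 1).foldl
      (fun multiset i =>
        if PySem.Chars.isalpha (PySem.List.pyGetD cs i ' ')
            && PySem.Chars.isalpha (PySem.List.pyGetD cs (i + 1) ' ')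
        then multiset ++ [String.mk [PySem.List.pyGetD cs i ' ', PySem.List.pyGetD cs (i + 1) ' ']]
        else multiset) []
    = pvPF cs := by
  have hlen : ((cs.length : Int) - 1 - 0).toNat = cs.length - 1 := by omega
  rw [PySem.List.pyRange_one, List.foldl_map, hlen]
  simp only [zero_add, ← Nat.cast_add_one, PySem.List.pyGetD_natCast]
  simpa using pvA_loop cs []

-- B's fold with final flush equals pvPF
theorem pvB_eq (cs : List Char) :
    (cs.foldl
      (fun (st : List String × List Char) c =>
        if PySem.Chars.isalpha c then (st.1, st.2 ++ [c])
        else (st.1 ++ pvPairs st.2, [])) ([], [])).1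
      ++ pvPairs (cs.foldl
      (fun (st : List String × List Char) c =>
        if PySem.Chars.isalpha c then (st.1, st.2 ++ [c])
        else (st.1 ++ pvPairs st.2, [])) ([], [])).2
    = pvPF cs := by
  have := pvB_loop cs [] []
  simp only [List.nil_append] at this
  rw [this, pvF_eq_pvPF cs [] (by simp), List.nil_append]

theorem make_multiset_spec : Claim_equal_make_multiset := by
  intro s _
  unfold Spec_make_multiset make_multiset make_multiset_alt
  simp only [PySem.Str.len]
  rw [pvA_eq, pvB_eq]
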